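-- pv_equiv track=rewrite | github.com/tfardet/NNGT | nngt/plot/hive_helpers.py | _test_clockwise
-- ===== SOURCE A (Python) =====
-- def _test_clockwise(i, j, num_axes):
--     delta_max = int(0.5*num_axes)
--
--     if num_axes == 2:
--         return i != j
--
--     for target in range(delta_max):
--         for d in range(delta_max):
--             if j == ((num_axes - 1 + target - d) % num_axes) and i == target:
--                 return True
--
--     return False
-- ===== SOURCE B (Python) =====
-- def _test_clockwise(i, j, num_axes):
--     # O(1): A scans all (target, d) pairs; the unique candidate d is
--     # (num_axes - 1 + i - j) % num_axes, so just check bounds.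
--     if num_axes == 2:
--         return i != j
--     dmax = num_axes // 2
--     if dmax <= 0 or not (0 <= j < num_axes):
--         return False
--     return 0 <= i < dmax and (num_axes - 1 + i - j) % num_axes < dmax
-- ===== Notes on version B (the rewrite author's own statement) =====
-- stated objective: faster
-- what changed: Replaced the O(num_axes^2) double scan over (target,d) pairs by an O(1) closed-form check: fix target=i and compute the unique candidate d = (num_axes-1+i-j) % num_axes, then test it against the bounds.
import Mathlib
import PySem

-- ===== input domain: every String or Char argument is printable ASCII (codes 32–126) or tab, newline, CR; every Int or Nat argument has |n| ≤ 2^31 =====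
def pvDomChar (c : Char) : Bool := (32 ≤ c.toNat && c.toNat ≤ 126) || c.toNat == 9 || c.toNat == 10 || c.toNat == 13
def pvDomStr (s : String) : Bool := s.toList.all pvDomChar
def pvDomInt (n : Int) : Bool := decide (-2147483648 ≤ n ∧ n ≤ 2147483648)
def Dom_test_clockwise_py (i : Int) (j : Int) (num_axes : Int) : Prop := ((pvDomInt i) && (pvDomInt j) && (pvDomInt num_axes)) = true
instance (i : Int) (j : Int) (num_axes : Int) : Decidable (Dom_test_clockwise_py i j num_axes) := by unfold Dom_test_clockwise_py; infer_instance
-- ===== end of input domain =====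

-- B replaces A's O(num_axes^2) double loop by an O(1) modular-arithmetic bound check (objective: faster).

-- ===== PORT A =====
-- int(0.5*num_axes) truncates toward zero (the float product is exact for |num_axes| ≤ 2^31): Int.tdiv
def test_clockwise_py (i : Int) (j : Int) (num_axes : Int) : Bool :=
  let delta_max := Int.tdiv num_axes 2
  if num_axes == 2 then decide (i ≠ j)
  else
    -- the nested for-loops return True at the first hit, else False: List.any ∘ List.any
    (PySem.List.pyRange 0 delta_max 1).any (fun target =>
      (PySem.List.pyRange 0 delta_max 1).any (fun d =>
        j == PySem.Int.mod (num_axes - 1 + target - d) num_axes && i == target))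

-- ===== PORT B =====
def test_clockwise_py_alt (i : Int) (j : Int) (num_axes : Int) : Bool :=
  if num_axes == 2 then decide (i ≠ j)
  else
    let dmax := PySem.Int.floordiv num_axes 2
    if dmax ≤ 0 || !(decide (0 ≤ j) && decide (j < num_axes)) then false
    else decide (0 ≤ i) && decide (i < dmax) &&
         decide (PySem.Int.mod (num_axes - 1 + i - j) num_axes < dmax)

-- ===== PRECONDITION & SPEC =====
def Spec_test_clockwise_py (i : Int) (j : Int) (num_axes : Int) (out : Bool) : Prop := out = test_clockwise_py_alt i j num_axes
instance (i : Int) (j : Int) (num_axes : Int) (out : Bool) : Decidable (Spec_test_clockwise_py i j num_axes out) := by unfold Spec_test_clockwise_py; infer_instance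

-- ===== CLAIM (what is proved, stated in full; the proofs are below) =====
def Claim_equal_test_clockwise_py : Prop := ∀ (i : Int) (j : Int) (num_axes : Int), Dom_test_clockwise_py i j num_axes → Spec_test_clockwise_py i j num_axes (test_clockwise_py i j num_axes)

-- ===== LEMMAS AND PROOFS =====

-- B (the alt port), characterised as a proposition, for num_axes ≠ 2.
theorem pv_alt_iff (i j N : Int) (h2 : N ≠ 2) (hN : 3 ≤ N) :
    test_clockwise_py_alt i j N = true ↔
      (0 ≤ j ∧ j < N ∧ 0 ≤ i ∧ i < N / 2 ∧ (N - 1 + i - j) % N < N / 2) := by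
  unfold test_clockwise_py_alt
  rw [if_neg (by simpa using h2),
      PySem.Int.floordiv_eq_ediv_of_pos (a := N) (b := 2) (by norm_num),
      PySem.Int.mod_eq_emod_of_pos (by omega : (0:Int) < N)]
  by_cases hc : N / 2 ≤ 0 ∨ ¬(0 ≤ j ∧ j < N)
  · rw [if_pos (by simp; omega)]
    constructor
    · intro h; simp at h
    · rintro ⟨ha, hb, hc', hd, he⟩
      rcases hc with hc | hc <;> [omega; exact absurd ⟨ha, hb⟩ hc]
  · push_neg at hc
    rw [if_neg (by simp; omega)]
    simp only [Bool.and_eq_true, decide_eq_true_eq]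
    constructor
    · rintro ⟨⟨hi0, him⟩, hd⟩; exact ⟨hc.2.1, hc.2.2, hi0, him, hd⟩
    · rintro ⟨_, _, hi0, him, hd⟩; exact ⟨⟨hi0, him⟩, hd⟩

-- A (the port), characterised as an existential, for num_axes ≠ 2, num_axes ≥ 3.
theorem pv_a_iff (i j N : Int) (h2 : N ≠ 2) (hN : 3 ≤ N) :
    test_clockwise_py i j N = true ↔
      (∃ t, (0 ≤ t ∧ t < N / 2) ∧ ∃ d, (0 ≤ d ∧ d < N / 2) ∧
        j = (N - 1 + t - d) % N ∧ i = t) := by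
  unfold test_clockwise_py
  rw [if_neg (by simpa using h2), Int.tdiv_eq_ediv_of_nonneg (by omega : (0:Int) ≤ N)]
  simp only [List.any_eq_true, PySem.List.mem_pyRange_one, Bool.and_eq_true, beq_iff_eq]
  constructor
  · rintro ⟨t, ht, d, hd, hj, hi⟩
    exact ⟨t, ht, d, hd, by rw [hj, PySem.Int.mod_eq_emod_of_pos (by omega)], hi⟩
  · rintro ⟨t, ht, d, hd, hj, hi⟩
    exact ⟨t, ht, d, hd, by rw [hj, PySem.Int.mod_eq_emod_of_pos (by omega)], hi⟩

theorem pv_main (i j N : Int) : test_clockwise_py i j N = test_clockwise_py_alt i j N := by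
  by_cases h2 : N = 2
  · unfold test_clockwise_py test_clockwise_py_alt
    simp [h2]
  · by_cases hN : N < 3
    · -- num_axes ≤ 1: A's ranges are empty and B's dmax ≤ 0 guard fires; both are false
      unfold test_clockwise_py test_clockwise_py_alt
      rw [if_neg (by simpa using h2), if_neg (by simpa using h2)]
      have ht : Int.tdiv N 2 ≤ 0 := by
        by_cases h : 0 ≤ N
        · rw [Int.tdiv_eq_ediv_of_nonneg h]; omega
        · push_neg at h
          rcases N with n | n
          · simp at h; omega
          · simp [Int.tdiv]; omega
      rw [PySem.List.pyRange_one_eq_nil (by omega), if_pos ?_]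
      · simp
      · simp; omega
    · push_neg at hN
      rw [Bool.eq_iff_iff, pv_a_iff i j N h2 hN, pv_alt_iff i j N h2 hN]
      constructor
      · rintro ⟨t, ⟨ht0, htm⟩, d, ⟨hd0, hdm⟩, hj, hi⟩
        subst hi
        have hNpos : (0:Int) < N := by omega
        have hdiv : 2 * (N / 2) ≤ N := by omega
        have hj0 : 0 ≤ (N - 1 + i - d) % N := Int.emod_nonneg _ (by omega)
        have hjN : (N - 1 + i - d) % N < N := Int.emod_lt_of_pos _ hNpos
        have key : (N - 1 + i - (N - 1 + i - d) % N) % N = d := by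
          conv_lhs => rw [Int.sub_emod, Int.emod_emod_of_dvd _ (dvd_refl N), ← Int.sub_emod]
          have he : N - 1 + i - (N - 1 + i - d) = d := by ring
          rw [he, Int.emod_eq_of_lt hd0 (by omega)]
        subst hj
        exact ⟨hj0, hjN, ht0, htm, by rw [key]; omega⟩
      · rintro ⟨hj0, hjN, hi0, him, hd⟩
        refine ⟨i, ⟨hi0, him⟩, (N - 1 + i - j) % N,
          ⟨Int.emod_nonneg _ (by omega), hd⟩, ?_, rfl⟩
        conv_rhs => rw [Int.sub_emod, Int.emod_emod_of_dvd _ (dvd_refl N), ← Int.sub_emod]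
        have he : N - 1 + i - (N - 1 + i - j) = j := by ring
        rw [he, Int.emod_eq_of_lt hj0 hjN]

-- ===== VERDICT (by name: the statement is the Claim_ definition above) =====
theorem test_clockwise_py_spec : Claim_equal_test_clockwise_py := by
  intro i j n _
  unfold Spec_test_clockwise_py
  exact pv_main i j n
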